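-- pv_equiv track=rewrite | github.com/guillp/adventofcode | aoc2021/09.py | solve
-- ===== SOURCE A (Python) =====
-- from collections.abc import Iterator
--
-- def solve(content: str) -> tuple[int, int]:
--     grid = {complex(x, y): int(c) for y, line in enumerate(content.strip().splitlines()) for x, c in enumerate(line)}
--
--     def iter_low_points() -> Iterator[tuple[complex, int]]:
--         for point, height in grid.items():
--             if all(grid.get(point + d, 10) > height for d in (1, -1, 1j, -1j)):
--                 yield point, height
--
--     part1 = 0
--     basins = []
--     for low_point, height in iter_low_points():
--         part1 += height + 1
--         to_visit = {low_point}
--         visited = set()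
--         while to_visit:
--             point = to_visit.pop()
--             visited.add(point)
--             for nb in (point + 1, point - 1, point + 1j, point - 1j):
--                 if nb in visited or grid.get(nb, 9) == 9:
--                     continue
--                 to_visit.add(nb)
--         basins.append(len(visited))
--
--     part2 = 1
--     for basin in sorted(basins)[-3:]:
--         part2 *= basin
--
--     return part1, part2
-- ===== SOURCE B (Python) =====
-- def solve(content: str) -> tuple[int, int]:
--     rows = [[int(c) for c in line] for line in content.strip().splitlines()]
--
--     def height(x: int, y: int) -> int:
--         if 0 <= y < len(rows) and 0 <= x < len(rows[y]):
--             return rows[y][x]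
--         return 10
--
--     # one-time component labeling: every cell gets a label; basins are the
--     # connected components of cells of height < 9 (9-cells stay singletons)
--     label = {}
--     size = {}
--     for y, row in enumerate(rows):
--         for x, _ in enumerate(row):
--             if (x, y) in label:
--                 continue
--             seed = (x, y)
--             label[seed] = seed
--             stack = [seed]
--             n = 0
--             while stack:
--                 px, py = stack.pop()
--                 n += 1
--                 if height(px, py) < 9:
--                     for nb in ((px + 1, py), (px - 1, py), (px, py + 1), (px, py - 1)):
--                         if height(nb[0], nb[1]) < 9 and nb not in label:
--                             label[nb] = seed
--                             stack.append(nb)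
--             size[seed] = n
--
--     part1 = 0
--     basins = []
--     for y, row in enumerate(rows):
--         for x, h in enumerate(row):
--             if h < height(x + 1, y) and h < height(x - 1, y) and h < height(x, y + 1) and h < height(x, y - 1):
--                 part1 += h + 1
--                 basins.append(size[label[(x, y)]])
--
--     part2 = 1
--     for basin in sorted(basins)[-3:]:
--         part2 *= basin
--
--     return part1, part2
-- ===== Notes on version B (the rewrite author's own statement) =====
-- stated objective: alternative
-- what changed: Replaces A's per-low-point flood fill by a one-time connected-component labeling pass (a single stack-based DFS sweep over all cells that assigns every cell a component label and records each component's size once), so each basin size becomes a dictionary lookup per low point instead of a fresh fill.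
import Mathlib
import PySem

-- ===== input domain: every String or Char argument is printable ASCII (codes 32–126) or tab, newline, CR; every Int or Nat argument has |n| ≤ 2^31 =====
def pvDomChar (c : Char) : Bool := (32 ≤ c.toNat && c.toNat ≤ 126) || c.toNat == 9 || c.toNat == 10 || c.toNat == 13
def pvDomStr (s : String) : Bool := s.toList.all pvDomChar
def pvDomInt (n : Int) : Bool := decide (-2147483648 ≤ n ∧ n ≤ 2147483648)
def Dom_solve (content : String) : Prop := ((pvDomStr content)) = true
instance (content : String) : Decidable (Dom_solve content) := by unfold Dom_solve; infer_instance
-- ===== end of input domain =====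

-- B replaces A's per-low-point flood fill by a one-time component-labeling sweep (stack-based DFS
-- assigning every cell a label and each label a size), so basins become dictionary lookups (objective: alternative).

-- ===== PORT A =====

-- int(c) for a single character; `none` (Python ValueError on a non-digit) is excluded by Pre_solve, defaulted to 0 there
def pyIntChar (c : Char) : Int := (PySem.Int.ofChars? [c]).getD 0

-- grid = {complex(x, y): int(c) for y, line in ... for x, c in ...}; complex(x, y) is modelled as the pair (x, y)
def aGrid (content : String) : PySem.Dict (Int × Int) Int :=
  (PySem.List.enumerate (PySem.Str.splitlines (PySem.Str.strip content))).foldl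
    (fun d yl => (PySem.List.enumerate yl.2.toList).foldl
      (fun d xc => d.insert (xc.1, yl.1) (pyIntChar xc.2)) d)
    PySem.Dict.empty

-- the `while to_visit:` loop, returning len(visited); fuel-guarded recursion: every iteration pops one
-- element and each grid cell is popped at most once, so fuel grid.size + 1 (passed by `solve`) suffices.
-- CPython's set.pop order is implementation-defined; we pop the first-inserted element.
def aFillGo (grid : PySem.Dict (Int × Int) Int) :
    Nat → List (Int × Int) → PySem.Set (Int × Int) → Int
  | 0, _, vis => PySem.Set.len vis
  | fuel + 1, tv, vis =>
    match tv with
    | [] => PySem.Set.len vis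
    | p :: rest =>
      let vis' := PySem.Set.add vis p
      let tv' := [(p.1 + 1, p.2), (p.1 - 1, p.2), (p.1, p.2 + 1), (p.1, p.2 - 1)].foldl
        (fun tv nb =>
          if PySem.Set.contains vis' nb || (grid.getD nb 9 == 9) then tv
          else PySem.Set.add tv nb) rest
      aFillGo grid fuel tv' vis'

def solve (content : String) : Int × Int :=
  let grid := aGrid content
  -- iter_low_points consumed by the for loop = filter of grid.items
  let lows := grid.items.filter (fun ph =>
    [((1 : Int), (0 : Int)), (-1, 0), (0, 1), (0, -1)].all
      (fun dd => decide (ph.2 < grid.getD (ph.1.1 + dd.1, ph.1.2 + dd.2) 10)))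
  let pb := lows.foldl
    (fun (acc : Int × List Int) ph =>
      (acc.1 + ph.2 + 1,
       acc.2 ++ [aFillGo grid (grid.size + 1) [ph.1] (PySem.Set.empty : PySem.Set (Int × Int))]))
    ((0 : Int), ([] : List Int))
  let part2 := (PySem.List.slice (PySem.List.sorted pb.2 (fun b => b) false) (some (-3)) none).foldl
    (fun a b => a * b) 1
  (pb.1, part2)

-- ===== PORT B =====

def bRows (content : String) : List (List Int) :=
  (PySem.Str.splitlines (PySem.Str.strip content)).map (fun line => line.toList.map pyIntChar)

def bHeight (rows : List (List Int)) (x y : Int) : Int :=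
  if 0 ≤ y ∧ y < PySem.List.len rows ∧ 0 ≤ x ∧ x < PySem.List.len (PySem.List.pyGetD rows y []) then
    PySem.List.pyGetD (PySem.List.pyGetD rows y []) x 0
  else 10

def bIsLow (rows : List (List Int)) (x y h : Int) : Bool :=
  decide (h < bHeight rows (x + 1) y) && decide (h < bHeight rows (x - 1) y) &&
  decide (h < bHeight rows x (y + 1)) && decide (h < bHeight rows x (y - 1))

-- the `while stack:` loop of the labeling sweep; Python's stack.pop() pops the LAST element.
-- Fuel-guarded recursion: each iteration pops once and every cell is pushed at most once,
-- so fuel = #cells + 1 (passed by `solve_alt`) suffices.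
def bLabelGo (rows : List (List Int)) (seed : Int × Int) :
    Nat → List (Int × Int) → PySem.Dict (Int × Int) (Int × Int) → Int →
    PySem.Dict (Int × Int) (Int × Int) × Int
  | 0, _, label, n => (label, n)
  | fuel + 1, stack, label, n =>
    match PySem.List.pop? stack (-1) with
    | none => (label, n)
    | some (p, rest) =>
      if bHeight rows p.1 p.2 < 9 then
        let st := [(p.1 + 1, p.2), (p.1 - 1, p.2), (p.1, p.2 + 1), (p.1, p.2 - 1)].foldl
          (fun (st : List (Int × Int) × PySem.Dict (Int × Int) (Int × Int)) nb =>
            if decide (bHeight rows nb.1 nb.2 < 9) && !st.2.contains nb then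
              (st.1 ++ [nb], st.2.insert nb seed)
            else st) (rest, label)
        bLabelGo rows seed fuel st.1 st.2 (n + 1)
      else bLabelGo rows seed fuel rest label (n + 1)

-- the one-time labeling pass: label / size dicts built by scanning every cell once
def bLabelPass (rows : List (List Int)) (fuel : Nat) :
    PySem.Dict (Int × Int) (Int × Int) × PySem.Dict (Int × Int) Int :=
  (PySem.List.enumerate rows).foldl
    (fun ls yr =>
      (PySem.List.enumerate yr.2).foldl
        (fun (ls : PySem.Dict (Int × Int) (Int × Int) × PySem.Dict (Int × Int) Int) xh =>
          if ls.1.contains (xh.1, yr.1) then ls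
          else
            let r := bLabelGo rows (xh.1, yr.1) fuel [(xh.1, yr.1)]
              (ls.1.insert (xh.1, yr.1) (xh.1, yr.1)) 0
            (r.1, ls.2.insert (xh.1, yr.1) r.2)) ls)
    (PySem.Dict.empty, PySem.Dict.empty)

def solve_alt (content : String) : Int × Int :=
  let rows := bRows content
  let fuel := (rows.map List.length).sum + 1
  let ls := bLabelPass rows fuel
  let pb := (PySem.List.enumerate rows).foldl
    (fun (acc : Int × List Int) yr =>
      (PySem.List.enumerate yr.2).foldl
        (fun (acc : Int × List Int) xh =>
          if bIsLow rows xh.1 yr.1 xh.2 then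
            (acc.1 + xh.2 + 1,
             -- size[label[(x, y)]]: both keys are always present for an in-grid cell (no KeyError), so the getD defaults are never used
             acc.2 ++ [ls.2.getD (ls.1.getD (xh.1, yr.1) (0, 0)) 0])
          else acc) acc)
    ((0 : Int), ([] : List Int))
  let part2 := (PySem.List.slice (PySem.List.sorted pb.2 (fun b => b) false) (some (-3)) none).foldl
    (fun a b => a * b) 1
  (pb.1, part2)

-- ===== PRECONDITION & SPEC =====

-- Pre_ excludes exactly the inputs where some character of a (stripped) line is not an ASCII digit:
-- there Python A raises ValueError in int(c).
def Pre_solve (content : String) : Prop :=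
  ((PySem.Str.splitlines (PySem.Str.strip content)).all
    (fun line => line.toList.all PySem.Chars.isdigit)) = true
instance (content : String) : Decidable (Pre_solve content) := by unfold Pre_solve; infer_instance

def pvWitness_solve : String := "21\n98"

def Spec_solve (content : String) (out : Int × Int) : Prop := out = solve_alt content
instance (content : String) (out : Int × Int) : Decidable (Spec_solve content out) := by
  unfold Spec_solve; infer_instance

-- ===== CLAIM (what is proved, stated in full; the proofs are below) =====
def Claim_equal_solve : Prop :=
  ∀ (content : String), Dom_solve content → Pre_solve content → Spec_solve content (solve content)

-- ===== LEMMAS AND PROOFS =====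

-- in-bounds test and cell value on B's row representation
abbrev Inb (rows : List (List Int)) (p : Int × Int) : Prop :=
  0 ≤ p.2 ∧ p.2 < rows.length ∧ 0 ≤ p.1 ∧ p.1 < (rows.getD p.2.toNat []).length
def Cellv (rows : List (List Int)) (p : Int × Int) : Int :=
  (rows.getD p.2.toNat []).getD p.1.toNat 0

-- the four orthogonal neighbours, the step relation of the basin graph, and its reachability
def Adjs (p : Int × Int) : List (Int × Int) :=
  [(p.1 + 1, p.2), (p.1 - 1, p.2), (p.1, p.2 + 1), (p.1, p.2 - 1)]
def Rstep (rows : List (List Int)) (p q : Int × Int) : Prop :=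
  q ∈ Adjs p ∧ bHeight rows p.1 p.2 < 9 ∧ bHeight rows q.1 q.2 < 9
def Reach (rows : List (List Int)) : (Int × Int) → (Int × Int) → Prop :=
  Relation.ReflTransGen (Rstep rows)

-- all grid cells in scan order
def cellPts (rows : List (List Int)) : List (Int × Int) :=
  (PySem.List.enumerate rows).flatMap
    (fun yr => (PySem.List.enumerate yr.2).map (fun xh => (xh.1, yr.1)))

-- the body of B's outer labeling loop, as a function of the scanned point only
def bBody (rows : List (List Int)) (fuel : Nat)
    (ls : PySem.Dict (Int × Int) (Int × Int) × PySem.Dict (Int × Int) Int) (p : Int × Int) :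
    PySem.Dict (Int × Int) (Int × Int) × PySem.Dict (Int × Int) Int :=
  if ls.1.contains p then ls
  else
    let r := bLabelGo rows p fuel [p] (ls.1.insert p p) 0
    (r.1, ls.2.insert p r.2)

-- invariant of B's outer labeling loop
def BInv (rows : List (List Int))
    (ls : PySem.Dict (Int × Int) (Int × Int) × PySem.Dict (Int × Int) Int) : Prop :=
  (∀ x q, ls.1.contains x = true → Rstep rows x q → ls.1.contains q = true) ∧
  (∀ x, ls.1.contains x = true → ∃ (s : Int × Int) (P : List (Int × Int)), ls.1.get? x = some s ∧ ls.1.contains s = true ∧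
    Reach rows s x ∧ ls.2.get? s = some ((P.length : Int)) ∧ P.Nodup ∧
    (∀ z, z ∈ P ↔ Reach rows s z))

-- the grid dict comprehension as one flat association list
def cellList (lines : List String) : List ((Int × Int) × Int) :=
  (PySem.List.enumerate lines).flatMap
    (fun yl => (PySem.List.enumerate yl.2.toList).map (fun xc => ((xc.1, yl.1), pyIntChar xc.2)))

lemma nodup_keysFlat (lines : List String) (s : Int) :
    ((PySem.List.enumerate lines s).flatMap
      (fun yl => (PySem.List.enumerate yl.2.toList).map (fun xc => ((xc.1, yl.1) : Int × Int)))).Nodup := by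
  induction lines generalizing s with
  | nil => simp [PySem.List.enumerate_nil]
  | cons line t ih =>
    rw [PySem.List.enumerate_cons, List.flatMap_cons]
    apply List.Nodup.append
    · have hp := PySem.List.pairwise_lt_enumerate line.toList 0
      rw [List.Nodup, List.pairwise_map]
      exact hp.imp (fun {a b} h => by simp; omega)
    · exact ih (s + 1)
    · intro a ha hb
      simp only [List.mem_map] at ha
      obtain ⟨xc, _, rfl⟩ := ha
      simp only [List.mem_flatMap, List.mem_map, PySem.List.mem_enumerate_iff] at hb
      obtain ⟨yl, ⟨k, hk, rfl⟩, xc2, _, heq⟩ := hb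
      have := congrArg Prod.snd heq
      simp at this
      omega

lemma foldl_flatMap {α β γ : Type} (l : List α) (g : α → List β) (f : γ → β → γ) (init : γ) :
    (l.flatMap g).foldl f init = l.foldl (fun a x => (g x).foldl f a) init := by
  induction l generalizing init with
  | nil => rfl
  | cons x t ih => simp [List.flatMap_cons, List.foldl_append, ih]

lemma enumerate_map {α β : Type} (f : α → β) (l : List α) (s : Int) :
    PySem.List.enumerate (l.map f) s = (PySem.List.enumerate l s).map (fun p => (p.1, f p.2)) := by
  induction l generalizing s with
  | nil => rfl
  | cons x t ih => simp [PySem.List.enumerate_cons, ih]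

lemma map_fst_cellList (lines : List String) :
    (cellList lines).map (·.1) =
      (PySem.List.enumerate lines).flatMap
        (fun yl => (PySem.List.enumerate yl.2.toList).map (fun xc => ((xc.1, yl.1) : Int × Int))) := by
  simp [cellList, List.map_flatMap, List.map_map, Function.comp_def]

lemma nodup_keys_cellList (lines : List String) : ((cellList lines).map (·.1)).Nodup := by
  rw [map_fst_cellList]; exact nodup_keysFlat lines 0

lemma items_aGrid (content : String) :
    (aGrid content).items = cellList (PySem.Str.splitlines (PySem.Str.strip content)) := by
  have h1 : aGrid content =
      (cellList (PySem.Str.splitlines (PySem.Str.strip content))).foldl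
        (fun d a => d.insert a.1 a.2) PySem.Dict.empty := by
    unfold aGrid cellList
    rw [foldl_flatMap]
    simp [List.foldl_map]
  have h2 := PySem.Dict.items_foldl_insert_fresh
    (l := cellList (PySem.Str.splitlines (PySem.Str.strip content)))
    (k := fun a => a.1) (v := fun a => a.2) (d := PySem.Dict.empty)
    (fun a _ => PySem.Dict.contains_empty _) (nodup_keys_cellList _)
  rw [h1, h2]
  simp only [Prod.mk.eta, PySem.Dict.empty, List.nil_append, List.map_id']

lemma mem_cellList (lines : List String) (kv : (Int × Int) × Int) :
    kv ∈ cellList lines ↔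
      ∃ (yk : Nat) (_ : yk < lines.length) (xk : Nat) (_ : xk < lines[yk].toList.length),
        kv = (((xk : Int), (yk : Int)), pyIntChar lines[yk].toList[xk]) := by
  simp only [cellList, List.mem_flatMap, List.mem_map, PySem.List.mem_enumerate_iff]
  constructor
  · rintro ⟨yl, ⟨yk, hy, rfl⟩, xc, ⟨xk, hx, rfl⟩, rfl⟩
    exact ⟨yk, hy, xk, by simpa using hx, by simp⟩
  · rintro ⟨yk, hy, xk, hx, rfl⟩
    exact ⟨((yk : Int), lines[yk]), ⟨yk, hy, by simp⟩,
      ⟨((xk : Int), lines[yk].toList[xk]), ⟨xk, hx, by simp⟩, by simp⟩⟩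

lemma length_bRows (content : String) :
    (bRows content).length = (PySem.Str.splitlines (PySem.Str.strip content)).length := by
  simp only [bRows, List.length_map]

lemma len_rows_getD (content : String) (yk : Nat)
    (hy : yk < (PySem.Str.splitlines (PySem.Str.strip content)).length) :
    ((bRows content).getD yk []).length
      = (PySem.Str.splitlines (PySem.Str.strip content))[yk].toList.length := by
  simp [bRows, List.getD, hy]

lemma keys_aGrid (content : String) (p : Int × Int) :
    p ∈ (aGrid content).keys ↔ Inb (bRows content) p := by
  have hk : (aGrid content).keys = (cellList (PySem.Str.splitlines (PySem.Str.strip content))).map (·.1) := by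
    simp only [PySem.Dict.keys, items_aGrid]
  rw [hk]
  constructor
  · intro hp
    simp only [List.mem_map] at hp
    obtain ⟨kv, hkv, rfl⟩ := hp
    rw [mem_cellList] at hkv
    obtain ⟨yk, hy, xk, hx, rfl⟩ := hkv
    refine ⟨by simp, ?_, by simp, ?_⟩
    · simp only [length_bRows]
      exact_mod_cast hy
    · simp only [Int.toNat_natCast]
      rw [len_rows_getD content yk hy]
      exact_mod_cast hx
  · rintro ⟨h1, h2, h3, h4⟩
    rw [length_bRows] at h2
    have hy : p.2.toNat < (PySem.Str.splitlines (PySem.Str.strip content)).length := by omega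
    have hx : p.1.toNat < (PySem.Str.splitlines (PySem.Str.strip content))[p.2.toNat].toList.length := by
      rw [← len_rows_getD content p.2.toNat hy]; omega
    simp only [List.mem_map]
    refine ⟨(((p.1.toNat : Int), (p.2.toNat : Int)),
      pyIntChar (PySem.Str.splitlines (PySem.Str.strip content))[p.2.toNat].toList[p.1.toNat]), ?_, ?_⟩
    · rw [mem_cellList]; exact ⟨p.2.toNat, hy, p.1.toNat, hx, rfl⟩
    · have e1 : (p.1.toNat : Int) = p.1 := by omega
      have e2 : (p.2.toNat : Int) = p.2 := by omega
      simp only [e1, e2]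

lemma nodup_keys_aGrid (content : String) : (aGrid content).keys.Nodup := by
  have hk : (aGrid content).keys = (cellList (PySem.Str.splitlines (PySem.Str.strip content))).map (·.1) := by
    simp only [PySem.Dict.keys, items_aGrid]
  rw [hk]; exact nodup_keys_cellList _

lemma getD_aGrid (content : String) (p : Int × Int) (d : Int) :
    (aGrid content).getD p d = if Inb (bRows content) p then Cellv (bRows content) p else d := by
  by_cases h : Inb (bRows content) p
  · rw [if_pos h]
    obtain ⟨h1, h2, h3, h4⟩ := h
    rw [length_bRows] at h2
    have hy : p.2.toNat < (PySem.Str.splitlines (PySem.Str.strip content)).length := by omega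
    have hx : p.1.toNat < (PySem.Str.splitlines (PySem.Str.strip content))[p.2.toNat].toList.length := by
      rw [← len_rows_getD content p.2.toNat hy]; omega
    have hmem : (p, Cellv (bRows content) p) ∈ (aGrid content).items := by
      rw [items_aGrid, mem_cellList]
      refine ⟨p.2.toNat, hy, p.1.toNat, hx, ?_⟩
      have e1 : (p.1.toNat : Int) = p.1 := by omega
      have e2 : (p.2.toNat : Int) = p.2 := by omega
      have hcv : Cellv (bRows content) p
          = pyIntChar (PySem.Str.splitlines (PySem.Str.strip content))[p.2.toNat].toList[p.1.toNat] := by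
        unfold Cellv
        have hrow : (bRows content).getD p.2.toNat []
            = (PySem.Str.splitlines (PySem.Str.strip content))[p.2.toNat].toList.map pyIntChar := by
          simp [bRows, List.getD, hy]
        rw [hrow]
        simp only [List.getD, List.getElem?_map, List.getElem?_eq_getElem hx, Option.map_some,
          Option.getD_some]
      rw [hcv, e1, e2]
    exact PySem.Dict.getD_of_mem_items _ hmem (nodup_keys_aGrid content) d
  · rw [if_neg h]
    apply PySem.Dict.getD_of_not_contains
    rw [← Bool.not_eq_true, PySem.Dict.contains_iff_mem_keys, keys_aGrid]
    exact h

lemma bHeight_eq (rows : List (List Int)) (x y : Int) :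
    bHeight rows x y = if Inb rows (x, y) then Cellv rows (x, y) else 10 := by
  unfold bHeight Inb Cellv
  by_cases hy : 0 ≤ y ∧ y < rows.length
  · have hrow : PySem.List.pyGetD rows y [] = rows.getD y.toNat [] := by
      have e : y = ((y.toNat : Nat) : Int) := by omega
      rw [e, PySem.List.pyGetD_natCast]
      simp only [Int.toNat_natCast]
    rw [hrow]
    by_cases hx : 0 ≤ x ∧ x < ((rows.getD y.toNat []).length : Int)
    · rw [if_pos (by simp only [PySem.List.len_eq]; exact ⟨hy.1, hy.2, hx.1, by exact_mod_cast hx.2⟩),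
        if_pos ⟨hy.1, hy.2, hx.1, hx.2⟩]
      have e : x = ((x.toNat : Nat) : Int) := by omega
      rw [e, PySem.List.pyGetD_natCast]
      simp only [Int.toNat_natCast]
    · rw [if_neg (by simp only [PySem.List.len_eq]; omega),
        if_neg (by push_cast; omega)]
  · have : ¬ (0 ≤ y ∧ y < PySem.List.len rows ∧ 0 ≤ x
        ∧ x < PySem.List.len (PySem.List.pyGetD rows y [])) := by
      simp only [PySem.List.len_eq]; omega
    rw [if_neg this, if_neg (by omega)]

lemma size_flat (lines : List String) (s : Int) :
    ((PySem.List.enumerate lines s).flatMap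
      (fun yl => (PySem.List.enumerate yl.2.toList).map (fun xc => ((xc.1, yl.1), pyIntChar xc.2)))).length
    = ((lines.map (fun line => line.toList.map pyIntChar)).map List.length).sum := by
  induction lines generalizing s with
  | nil => simp [PySem.List.enumerate_nil]
  | cons l t ih =>
    simp only [PySem.List.enumerate_cons, List.flatMap_cons, List.length_append, List.map_cons,
      List.sum_cons, List.length_map, PySem.List.length_enumerate, ih]

lemma size_aGrid (content : String) :
    (aGrid content).size = ((bRows content).map List.length).sum := by
  have h : (aGrid content).size = (cellList (PySem.Str.splitlines (PySem.Str.strip content))).length := by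
    simp only [PySem.Dict.size, items_aGrid]
  rw [h]
  simp only [bRows, cellList]
  exact size_flat _ 0

lemma digit_val {c : Char} (h : PySem.Chars.isdigit c = true) :
    0 ≤ pyIntChar c ∧ pyIntChar c ≤ 9 := by
  have hle : 48 ≤ c.toNat ∧ c.toNat ≤ 57 := by
    simp [PySem.Chars.isdigit, Char.le_def] at h
    exact ⟨h.1, h.2⟩
  obtain ⟨h1, h2⟩ := hle
  rw [← Char.ofNat_toNat c]
  generalize c.toNat = k at h1 h2
  interval_cases k <;> decide

lemma pre_forall (content : String) (hpre : Pre_solve content) :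
    ∀ line ∈ PySem.Str.splitlines (PySem.Str.strip content), ∀ c ∈ line.toList,
      PySem.Chars.isdigit c = true := by
  unfold Pre_solve at hpre
  simpa [List.all_eq_true] using hpre

lemma cell_bounds (content : String) (hpre : Pre_solve content) (p : Int × Int)
    (h : Inb (bRows content) p) :
    0 ≤ Cellv (bRows content) p ∧ Cellv (bRows content) p ≤ 9 := by
  obtain ⟨h1, h2, h3, h4⟩ := h
  rw [length_bRows] at h2
  have hy : p.2.toNat < (PySem.Str.splitlines (PySem.Str.strip content)).length := by omega
  have hx : p.1.toNat < (PySem.Str.splitlines (PySem.Str.strip content))[p.2.toNat].toList.length := by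
    rw [← len_rows_getD content p.2.toNat hy]; omega
  have hcv : Cellv (bRows content) p
      = pyIntChar (PySem.Str.splitlines (PySem.Str.strip content))[p.2.toNat].toList[p.1.toNat] := by
    unfold Cellv
    have hrow : (bRows content).getD p.2.toNat []
        = (PySem.Str.splitlines (PySem.Str.strip content))[p.2.toNat].toList.map pyIntChar := by
      simp [bRows, List.getD, hy]
    rw [hrow]
    simp only [List.getD, List.getElem?_map, List.getElem?_eq_getElem hx, Option.map_some,
      Option.getD_some]
  rw [hcv]
  exact digit_val (pre_forall content hpre _ (List.getElem_mem hy) _ (List.getElem_mem hx))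

lemma hg10_lemma (content : String) (q : Int × Int) :
    (aGrid content).getD q 10 = bHeight (bRows content) q.1 q.2 := by
  rw [getD_aGrid, bHeight_eq]

lemma hg9_lemma (content : String) (hpre : Pre_solve content) (nb : Int × Int) :
    ((aGrid content).getD nb 9 == 9) = !decide (bHeight (bRows content) nb.1 nb.2 < 9) := by
  obtain ⟨a, b⟩ := nb
  rw [getD_aGrid, bHeight_eq]
  by_cases h : Inb (bRows content) (a, b)
  · rw [if_pos h, if_pos h]
    obtain ⟨h0, h9⟩ := cell_bounds content hpre (a, b) h
    rw [Bool.eq_iff_iff]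
    simp only [beq_iff_eq, Bool.not_eq_eq_eq_not, Bool.not_true, decide_eq_false_iff_not, not_lt]
    constructor
    · intro he; omega
    · intro he; omega
  · rw [if_neg h, if_neg h]
    decide

lemma inb_of_lt9 (rows : List (List Int)) (p : Int × Int)
    (h : bHeight rows p.1 p.2 < 9) : Inb rows p := by
  rw [bHeight_eq] at h
  by_cases hin : Inb rows p
  · exact hin
  · rw [if_neg hin] at h; omega

lemma adjs_symm {p q : Int × Int} (h : q ∈ Adjs p) : p ∈ Adjs q := by
  obtain ⟨a, b⟩ := p; obtain ⟨c, d⟩ := q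
  simp only [Adjs, List.mem_cons, List.not_mem_nil, or_false, Prod.mk.injEq] at h ⊢
  omega

lemma rstep_symm {rows : List (List Int)} {p q : Int × Int} (h : Rstep rows p q) :
    Rstep rows q p := ⟨adjs_symm h.1, h.2.2, h.2.1⟩

lemma reach_symm {rows : List (List Int)} {p q : Int × Int} (h : Reach rows p q) :
    Reach rows q p :=
  Relation.ReflTransGen.symmetric (fun _ _ hs => rstep_symm hs) h

lemma reach_closed {rows : List (List Int)} (d : PySem.Dict (Int × Int) (Int × Int))
    (hcl : ∀ x q, d.contains x = true → Rstep rows x q → d.contains q = true)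
    {a b : Int × Int} (ha : d.contains a = true) (h : Reach rows a b) : d.contains b = true := by
  induction h with
  | refl => exact ha
  | tail _ hstep ih => exact hcl _ _ ih hstep

lemma mem_cellPts (rows : List (List Int)) (p : Int × Int) :
    p ∈ cellPts rows ↔ Inb rows p := by
  simp only [cellPts, List.mem_flatMap, List.mem_map, PySem.List.mem_enumerate_iff]
  constructor
  · rintro ⟨yr, ⟨yk, hy, rfl⟩, xh, ⟨xk, hx, rfl⟩, rfl⟩
    refine ⟨by simp, by simpa using (by exact_mod_cast hy : (yk : Int) < rows.length), by simp, ?_⟩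
    simp [List.getD, List.getElem?_eq_getElem hy]
    exact_mod_cast hx
  · rintro ⟨h1, h2, h3, h4⟩
    have hy : p.2.toNat < rows.length := by omega
    have hx : p.1.toNat < rows[p.2.toNat].length := by
      have : (rows.getD p.2.toNat []) = rows[p.2.toNat] := by
        simp [List.getD, List.getElem?_eq_getElem hy]
      rw [this] at h4; omega
    refine ⟨((p.2.toNat : Int), rows[p.2.toNat]), ⟨p.2.toNat, hy, by simp⟩,
      ⟨((p.1.toNat : Int), rows[p.2.toNat][p.1.toNat]), ⟨p.1.toNat, hx, by simp⟩, ?_⟩⟩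
    have e1 : (p.1.toNat : Int) = p.1 := by omega
    have e2 : (p.2.toNat : Int) = p.2 := by omega
    simp [e1, e2]

lemma length_cellPts (rows : List (List Int)) :
    (cellPts rows).length = (rows.map List.length).sum := by
  unfold cellPts
  rw [List.length_flatMap]
  have h : ((PySem.List.enumerate rows).map
      (fun yr => ((PySem.List.enumerate yr.2).map (fun xh => (xh.1, yr.1))).length))
      = (PySem.List.enumerate rows).map (fun yr => yr.2.length) := by
    simp [PySem.List.length_enumerate]
  rw [h, show (fun yr : Int × List Int => yr.2.length) = List.length ∘ (Prod.snd) from rfl,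
    ← List.map_map, PySem.List.map_snd_enumerate]

lemma length_le_cells (rows : List (List Int)) (V : List (Int × Int)) (hnd : V.Nodup)
    (hV : ∀ x ∈ V, Inb rows x) : V.length ≤ (cellPts rows).length := by
  classical
  calc V.length = V.toFinset.card := (List.toFinset_card_of_nodup hnd).symm
    _ ≤ (cellPts rows).toFinset.card := Finset.card_le_card (by
        intro x hx
        simp only [List.mem_toFinset] at *
        exact (mem_cellPts rows x).mpr (hV x hx))
    _ ≤ (cellPts rows).length := (cellPts rows).toFinset_card_le

lemma afill_push (content : String) (hpre : Pre_solve content) :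
    ∀ (nbs : List (Int × Int)) (tv vis' : List (Int × Int)),
      (tv ++ vis').Nodup →
      ∃ new,
        nbs.foldl (fun tv nb =>
          if PySem.Set.contains vis' nb || ((aGrid content).getD nb 9 == 9) then tv
          else PySem.Set.add tv nb) tv = tv ++ new ∧
        ((tv ++ new) ++ vis').Nodup ∧
        (∀ x ∈ new, x ∈ nbs ∧ bHeight (bRows content) x.1 x.2 < 9 ∧ x ∉ vis') ∧
        (∀ nb ∈ nbs, bHeight (bRows content) nb.1 nb.2 < 9 → nb ∉ vis' → nb ∈ tv ++ new) := by
  intro nbs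
  induction nbs with
  | nil =>
    intro tv vis' hnd
    exact ⟨[], by simp, by simpa using hnd, by simp, by simp⟩
  | cons nb nbs ih =>
    intro tv vis' hnd
    rw [List.foldl_cons]
    by_cases hcond : (PySem.Set.contains vis' nb || ((aGrid content).getD nb 9 == 9)) = true
    · rw [if_pos hcond]
      obtain ⟨new, e, hnd', hprops, hcover⟩ := ih tv vis' hnd
      refine ⟨new, e, hnd', fun x hx => ?_, fun nb' h hh hv => ?_⟩
      · obtain ⟨m, h9, hnv⟩ := hprops x hx
        exact ⟨by simp [m], h9, hnv⟩
      · rcases List.mem_cons.mp h with rfl | h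
        · exfalso
          rw [hg9_lemma content hpre nb'] at hcond
          simp only [hh, decide_true, Bool.not_true, Bool.or_false] at hcond
          exact hv (by simpa using hcond)
        · exact hcover nb' h hh hv
    · rw [if_neg hcond]
      rw [hg9_lemma content hpre nb] at hcond
      simp only [Bool.or_eq_true, not_or, Bool.not_eq_true', Bool.not_eq_false,
        decide_eq_true_eq] at hcond
      obtain ⟨hnv, hh9⟩ := hcond
      have hnbv : nb ∉ vis' := fun h => hnv (by simpa using h)
      by_cases htv : nb ∈ tv
      · rw [PySem.Set.add_of_mem htv]
        obtain ⟨new, e, hnd', hprops, hcover⟩ := ih tv vis' hnd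
        refine ⟨new, e, hnd', fun x hx => ?_, fun nb' h hh hv => ?_⟩
        · obtain ⟨m, h9, hnv'⟩ := hprops x hx
          exact ⟨by simp [m], h9, hnv'⟩
        · rcases List.mem_cons.mp h with rfl | h
          · exact List.mem_append_left _ (by simpa using htv)
          · exact hcover nb' h hh hv
      · rw [PySem.Set.add_of_not_mem htv]
        have hnd2 : ((tv ++ [nb]) ++ vis').Nodup := by
          have e : (tv ++ [nb]) ++ vis' = tv ++ nb :: vis' := by simp
          rw [e]
          exact (List.perm_middle).nodup_iff.mpr
            (List.nodup_cons.mpr ⟨by simp [htv, hnbv], hnd⟩)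
        obtain ⟨new', e, hnd', hprops, hcover⟩ := ih (tv ++ [nb]) vis' hnd2
        refine ⟨nb :: new', by simpa [List.append_assoc] using e, by
            simpa [List.append_assoc] using hnd', fun x hx => ?_, fun nb' h hh hv => ?_⟩
        · rcases List.mem_cons.mp hx with rfl | hx
          · exact ⟨by simp, hh9, hnbv⟩
          · obtain ⟨m, h9, hnv'⟩ := hprops x hx
            exact ⟨by simp [m], h9, hnv'⟩
        · rcases List.mem_cons.mp h with rfl | h
          · simp
          · have := hcover nb' h hh hv
            simpa [List.append_assoc] using this

lemma afill_char (content : String) (hpre : Pre_solve content) (p0 : Int × Int) :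
    ∀ (fuel : Nat) (tv vis : List (Int × Int)),
      (tv ++ vis).Nodup →
      (∀ x ∈ tv ++ vis, Reach (bRows content) p0 x ∧ bHeight (bRows content) x.1 x.2 < 9) →
      (∀ x ∈ vis, ∀ q, Rstep (bRows content) x q → q ∈ tv ++ vis) →
      (cellPts (bRows content)).length - vis.length < fuel →
      ∃ V : List (Int × Int),
        aFillGo (aGrid content) fuel tv vis = ((V.length : Nat) : Int) ∧
        V.Nodup ∧ (∀ x ∈ tv ++ vis, x ∈ V) ∧
        (∀ x ∈ V, Reach (bRows content) p0 x) ∧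
        (∀ x ∈ V, ∀ q, Rstep (bRows content) x q → q ∈ V) := by
  intro fuel
  induction fuel with
  | zero => intro tv vis _ _ _ hf; omega
  | succ fuel ih =>
    intro tv vis hnd hRe hcl hf
    cases tv with
    | nil =>
      refine ⟨vis, rfl, by simpa using hnd, by simp, ?_, ?_⟩
      · intro x hx; exact (hRe x (by simpa using hx)).1
      · intro x hx q hq; simpa using hcl x hx q hq
    | cons p rest =>
      have hnd0 : (p :: (rest ++ vis)).Nodup := by simpa using hnd
      have hpv : p ∉ vis := fun h => (List.nodup_cons.mp hnd0).1 (List.mem_append_right _ h)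
      have hvis' : PySem.Set.add vis p = vis ++ [p] := PySem.Set.add_of_not_mem hpv
      have hnd3 : (rest ++ (vis ++ [p])).Nodup := by
        rw [← List.append_assoc]
        exact (List.perm_append_comm (l₁ := rest ++ vis) (l₂ := [p])).symm.nodup_iff.mp hnd0
      obtain ⟨new, e, hnd', hprops, hcover⟩ := afill_push content hpre
        [(p.1 + 1, p.2), (p.1 - 1, p.2), (p.1, p.2 + 1), (p.1, p.2 - 1)] rest (vis ++ [p]) hnd3
      have hstep : aFillGo (aGrid content) (fuel + 1) (p :: rest) vis
          = aFillGo (aGrid content) fuel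
            ([(p.1 + 1, p.2), (p.1 - 1, p.2), (p.1, p.2 + 1), (p.1, p.2 - 1)].foldl
              (fun tv nb =>
                if PySem.Set.contains (vis ++ [p]) nb || ((aGrid content).getD nb 9 == 9) then tv
                else PySem.Set.add tv nb) rest) (vis ++ [p]) := by
        show aFillGo (aGrid content) fuel _ _ = _
        rw [hvis']
      rw [hstep, e]
      have hp9 : bHeight (bRows content) p.1 p.2 < 9 := (hRe p (by simp)).2
      have hReP : Reach (bRows content) p0 p := (hRe p (by simp)).1
      have hRe'' : ∀ x ∈ (rest ++ new) ++ (vis ++ [p]),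
          Reach (bRows content) p0 x ∧ bHeight (bRows content) x.1 x.2 < 9 := by
        intro x hx
        simp only [List.mem_append, List.mem_singleton] at hx
        rcases hx with (hx | hx) | (hx | rfl)
        · exact hRe x (by simp [hx])
        · obtain ⟨hm, h9, _⟩ := hprops x hx
          exact ⟨Relation.ReflTransGen.tail hReP ⟨hm, hp9, h9⟩, h9⟩
        · exact hRe x (by simp [hx])
        · exact ⟨hReP, hp9⟩
      have hcl'' : ∀ x ∈ vis ++ [p], ∀ q, Rstep (bRows content) x q →
          q ∈ (rest ++ new) ++ (vis ++ [p]) := by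
        intro x hx q hq
        simp only [List.mem_append, List.mem_singleton] at hx
        rcases hx with hx | hpx
        · have hmem := hcl x hx q hq
          simp only [List.cons_append, List.mem_cons, List.mem_append] at hmem
          simp only [List.mem_append, List.mem_singleton]
          rcases hmem with rfl | hmem | hmem
          · exact Or.inr (Or.inr rfl)
          · exact Or.inl (Or.inl hmem)
          · exact Or.inr (Or.inl hmem)
        · subst hpx
          by_cases hqv : q ∈ vis ++ [x]
          · exact List.mem_append_right _ hqv
          · have hadj : q ∈ [(x.1 + 1, x.2), (x.1 - 1, x.2), (x.1, x.2 + 1), (x.1, x.2 - 1)] := hq.1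
            exact List.mem_append_left _ (hcover q hadj hq.2.2 hqv)
      have hlenb : (vis ++ [p]).length ≤ (cellPts (bRows content)).length := by
        refine length_le_cells (bRows content) (vis ++ [p]) ?_ ?_
        · exact (List.nodup_append.mp hnd').2.1
        · intro x hx
          exact inb_of_lt9 _ x (hRe'' x (by simp [hx])).2
      have hf'' : (cellPts (bRows content)).length - (vis ++ [p]).length < fuel := by
        simp only [List.length_append, List.length_singleton] at hlenb ⊢
        omega
      obtain ⟨V, hV1, hV2, hV3, hV4, hV5⟩ := ih ((rest ++ new)) (vis ++ [p]) hnd' hRe'' hcl'' hf''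
      refine ⟨V, hV1, hV2, ?_, hV4, hV5⟩
      intro x hx
      apply hV3
      simp only [List.cons_append, List.mem_cons, List.mem_append] at hx ⊢
      rcases hx with rfl | hx | hx
      · exact Or.inr (Or.inr (Or.inl rfl))
      · exact Or.inl (Or.inl hx)
      · exact Or.inr (Or.inl hx)

lemma afill_main (content : String) (hpre : Pre_solve content) (p0 : Int × Int)
    (h9 : bHeight (bRows content) p0.1 p0.2 < 9) :
    ∃ V : List (Int × Int),
      aFillGo (aGrid content) ((aGrid content).size + 1) [p0]
        (PySem.Set.empty : PySem.Set (Int × Int)) = ((V.length : Nat) : Int) ∧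
      V.Nodup ∧ (∀ z, z ∈ V ↔ Reach (bRows content) p0 z) := by
  have hfuel : (cellPts (bRows content)).length - ([] : List (Int × Int)).length
      < (aGrid content).size + 1 := by
    rw [size_aGrid, ← length_cellPts]
    simp
  obtain ⟨V, h1, h2, h3, h4, h5⟩ := afill_char content hpre p0 ((aGrid content).size + 1) [p0] []
    (by simp)
    (by intro x hx
        simp only [List.append_nil, List.mem_singleton] at hx
        subst hx
        exact ⟨Relation.ReflTransGen.refl, h9⟩)
    (by simp) hfuel
  refine ⟨V, h1, h2, fun z => ⟨h4 z, fun hr => ?_⟩⟩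
  induction hr with
  | refl => exact h3 p0 (by simp)
  | tail _ hstep ih => exact h5 _ ih _ hstep

lemma afill_nine (content : String) (hpre : Pre_solve content) (p0 : Int × Int)
    (hinb : Inb (bRows content) p0)
    (hlow : bIsLow (bRows content) p0.1 p0.2 (Cellv (bRows content) p0) = true)
    (h9 : ¬ bHeight (bRows content) p0.1 p0.2 < 9) :
    aFillGo (aGrid content) ((aGrid content).size + 1) [p0]
      (PySem.Set.empty : PySem.Set (Int × Int)) = 1 := by
  have hCv : bHeight (bRows content) p0.1 p0.2 = Cellv (bRows content) p0 := by
    rw [bHeight_eq, if_pos hinb]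
  simp only [bIsLow, Bool.and_eq_true, decide_eq_true_eq] at hlow
  obtain ⟨⟨⟨l1, l2⟩, l3⟩, l4⟩ := hlow
  have hnotinb : ∀ nb : Int × Int, Cellv (bRows content) p0 < bHeight (bRows content) nb.1 nb.2 →
      ((aGrid content).getD nb 9 == 9) = true := by
    intro nb hgt
    have hge : 9 ≤ Cellv (bRows content) p0 := by omega
    have h10 : ¬ Inb (bRows content) nb := by
      intro hin
      have hb : Cellv (bRows content) (nb.1, nb.2) ≤ 9 := (cell_bounds content hpre nb hin).2
      rw [bHeight_eq, if_pos hin] at hgt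
      omega
    rw [getD_aGrid, if_neg h10]
    decide
  have e1 := hnotinb (p0.1 + 1, p0.2) l1
  have e2 := hnotinb (p0.1 - 1, p0.2) l2
  have e3 := hnotinb (p0.1, p0.2 + 1) l3
  have e4 := hnotinb (p0.1, p0.2 - 1) l4
  have hsize : 1 ≤ (aGrid content).size := by
    rw [size_aGrid, ← length_cellPts]
    have : p0 ∈ cellPts (bRows content) := (mem_cellPts _ p0).mpr hinb
    exact List.length_pos_of_mem this
  obtain ⟨m, hm⟩ : ∃ m, (aGrid content).size = m + 1 := ⟨(aGrid content).size - 1, by omega⟩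
  rw [hm]
  show aFillGo (aGrid content) m.succ.succ [p0] PySem.Set.empty = 1
  have hstep : aFillGo (aGrid content) m.succ.succ [p0] PySem.Set.empty
      = aFillGo (aGrid content) (m + 1)
        ([(p0.1 + 1, p0.2), (p0.1 - 1, p0.2), (p0.1, p0.2 + 1), (p0.1, p0.2 - 1)].foldl
          (fun tv nb =>
            if PySem.Set.contains (PySem.Set.add PySem.Set.empty p0) nb
                || ((aGrid content).getD nb 9 == 9) then tv
            else PySem.Set.add tv nb) []) (PySem.Set.add PySem.Set.empty p0) := rfl
  rw [hstep]
  simp only [List.foldl_cons, List.foldl_nil, e1, e2, e3, e4, Bool.or_true, if_true]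
  rfl

lemma blabel_push (rows : List (List Int)) (s : Int × Int)
    (label₀ : PySem.Dict (Int × Int) (Int × Int)) :
    ∀ (nbs st M : List (Int × Int)) (label : PySem.Dict (Int × Int) (Int × Int)),
      (∀ q, q ∈ M → label.get? q = some s) →
      (∀ q, q ∉ M → label.get? q = label₀.get? q) →
      M.Nodup →
      ∃ (new : List (Int × Int)) (label' : PySem.Dict (Int × Int) (Int × Int)),
        nbs.foldl (fun (st : List (Int × Int) × PySem.Dict (Int × Int) (Int × Int)) nb =>
          if decide (bHeight rows nb.1 nb.2 < 9) && !st.2.contains nb then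
            (st.1 ++ [nb], st.2.insert nb s)
          else st) (st, label) = (st ++ new, label') ∧
        (∀ q, q ∈ M ++ new → label'.get? q = some s) ∧
        (∀ q, q ∉ M ++ new → label'.get? q = label₀.get? q) ∧
        (M ++ new).Nodup ∧
        (∀ x ∈ new, x ∈ nbs ∧ bHeight rows x.1 x.2 < 9 ∧ x ∉ M ∧ label₀.contains x = false) ∧
        (∀ nb ∈ nbs, bHeight rows nb.1 nb.2 < 9 → nb ∈ M ++ new ∨ label₀.contains nb = true) := by
  intro nbs
  induction nbs with
  | nil =>
    intro st M label hM hO hnd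
    exact ⟨[], label, by simp, by simpa using hM, by simpa using hO, by simpa using hnd,
      by simp, by simp⟩
  | cons nb nbs ih =>
    intro st M label hM hO hnd
    rw [List.foldl_cons]
    have hcont : label.contains nb = (decide (nb ∈ M) || label₀.contains nb) := by
      by_cases h : nb ∈ M
      · rw [PySem.Dict.contains_eq_isSome_get?, hM nb h]
        simp [h]
      · rw [PySem.Dict.contains_eq_isSome_get?, hO nb h, ← PySem.Dict.contains_eq_isSome_get?]
        simp [h]
    by_cases h9 : bHeight rows nb.1 nb.2 < 9
    · by_cases hm : nb ∈ M
      · rw [if_neg (by rw [hcont]; simp [hm])]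
        obtain ⟨new, label', e, c1, c2, c3, c4, c5⟩ := ih st M label hM hO hnd
        refine ⟨new, label', e, c1, c2, c3, fun x hx => ?_, fun nb' h h9' => ?_⟩
        · obtain ⟨a, b, c, d⟩ := c4 x hx
          exact ⟨by simp [a], b, c, d⟩
        · rcases List.mem_cons.mp h with rfl | h
          · exact Or.inl (List.mem_append_left _ hm)
          · exact c5 nb' h h9'
      · by_cases h0 : label₀.contains nb = true
        · rw [if_neg (by rw [hcont]; simp [h0])]
          obtain ⟨new, label', e, c1, c2, c3, c4, c5⟩ := ih st M label hM hO hnd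
          refine ⟨new, label', e, c1, c2, c3, fun x hx => ?_, fun nb' h h9' => ?_⟩
          · obtain ⟨a, b, c, d⟩ := c4 x hx
            exact ⟨by simp [a], b, c, d⟩
          · rcases List.mem_cons.mp h with rfl | h
            · exact Or.inr h0
            · exact c5 nb' h h9'
        · rw [if_pos (by rw [hcont]; simp [hm, h0, h9])]
          have hM' : ∀ q, q ∈ M ++ [nb] → (label.insert nb s).get? q = some s := by
            intro q hq
            rcases List.mem_append.mp hq with hqM | hqn
            · rw [PySem.Dict.get?_insert_of_ne _ _ (by rintro rfl; exact hm hqM), hM q hqM]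
            · simp only [List.mem_singleton] at hqn
              subst hqn
              exact PySem.Dict.get?_insert_self _ _ _
          have hO' : ∀ q, q ∉ M ++ [nb] → (label.insert nb s).get? q = label₀.get? q := by
            intro q hq
            simp only [List.mem_append, List.mem_singleton, not_or] at hq
            rw [PySem.Dict.get?_insert_of_ne _ _ hq.2, hO q hq.1]
          have hnd' : (M ++ [nb]).Nodup := by
            exact (List.perm_append_comm (l₁ := M) (l₂ := [nb])).symm.nodup_iff.mp
              (List.nodup_cons.mpr ⟨hm, hnd⟩)
          obtain ⟨new', label', e, c1, c2, c3, c4, c5⟩ := ih (st ++ [nb]) (M ++ [nb])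
            (label.insert nb s) hM' hO' hnd'
          refine ⟨nb :: new', label', by simpa [List.append_assoc] using e,
            fun q hq => c1 q (by simpa [List.append_assoc] using hq),
            fun q hq => c2 q (by simpa [List.append_assoc] using hq),
            by simpa [List.append_assoc] using c3,
            fun x hx => ?_, fun nb' h h9' => ?_⟩
          · rcases List.mem_cons.mp hx with rfl | hx
            · exact ⟨by simp, h9, hm, Bool.not_eq_true _ ▸ (by simpa using h0)⟩
            · obtain ⟨a, b, c, d⟩ := c4 x hx
              refine ⟨by simp [a], b, fun hxm => c (List.mem_append_left _ hxm), d⟩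
          · rcases List.mem_cons.mp h with rfl | h
            · exact Or.inl (by simp)
            · rcases c5 nb' h h9' with hin | hin
              · exact Or.inl (by simpa [List.append_assoc] using hin)
              · exact Or.inr hin
    · rw [if_neg (by simp [h9])]
      obtain ⟨new, label', e, c1, c2, c3, c4, c5⟩ := ih st M label hM hO hnd
      refine ⟨new, label', e, c1, c2, c3, fun x hx => ?_, fun nb' h h9' => ?_⟩
      · obtain ⟨a, b, c, d⟩ := c4 x hx
        exact ⟨by simp [a], b, c, d⟩
      · rcases List.mem_cons.mp h with rfl | h
        · exact absurd h9' h9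
        · exact c5 nb' h h9'

lemma blabel_go_char (rows : List (List Int)) (s : Int × Int)
    (label₀ : PySem.Dict (Int × Int) (Int × Int)) :
    ∀ (fuel : Nat) (stack P : List (Int × Int)) (label : PySem.Dict (Int × Int) (Int × Int)) (n : Int),
      (∀ x ∈ stack ++ P, label₀.contains x = false) →
      (stack ++ P).Nodup →
      (∀ x ∈ stack ++ P, Reach rows s x) →
      (∀ x ∈ stack ++ P, Inb rows x) →
      (∀ q, q ∈ stack ++ P → label.get? q = some s) →
      (∀ q, q ∉ stack ++ P → label.get? q = label₀.get? q) →
      (∀ x ∈ P, ∀ q, Rstep rows x q → q ∈ stack ++ P ∨ label₀.contains q = true) →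
      n = ((P.length : Nat) : Int) →
      (cellPts rows).length - P.length < fuel →
      ∃ (F : List (Int × Int)) (labelF : PySem.Dict (Int × Int) (Int × Int)),
        bLabelGo rows s fuel stack label n = (labelF, ((F.length : Nat) : Int)) ∧
        (∀ q, q ∈ F → labelF.get? q = some s) ∧
        (∀ q, q ∉ F → labelF.get? q = label₀.get? q) ∧
        F.Nodup ∧
        (∀ x ∈ stack ++ P, x ∈ F) ∧
        (∀ x ∈ F, Reach rows s x ∧ label₀.contains x = false ∧ Inb rows x) ∧
        (∀ x ∈ F, ∀ q, Rstep rows x q → q ∈ F ∨ label₀.contains q = true) := by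
  intro fuel
  induction fuel with
  | zero => intro stack P label n _ _ _ _ _ _ _ _ hf; omega
  | succ fuel ih =>
    intro stack P label n hfresh hnd hRe hInb hsome hother hclosed hn hf
    rcases List.eq_nil_or_concat stack with rfl | ⟨rest, p, rfl⟩
    · refine ⟨P, label, ?_, fun q hq => hsome q (by simpa using hq),
        fun q hq => hother q (by simpa using hq), by simpa using hnd,
        fun x hx => by simpa using hx,
        fun x hx => ⟨hRe x (by simpa using hx), hfresh x (by simpa using hx),
          hInb x (by simpa using hx)⟩,
        fun x hx q hq => by simpa using hclosed x hx q hq⟩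
      show (label, n) = _
      rw [hn]
    · simp only [List.concat_eq_append] at hfresh hnd hRe hInb hsome hother hclosed ⊢
      have hpop : PySem.List.pop? (rest ++ [p]) (-1) = some (p, rest) := PySem.List.pop?_last rest p
      have hpS : p ∈ (rest ++ [p]) ++ P := by simp
      have hndP : (p :: P).Nodup := by
        have h1 : ((rest ++ [p]) ++ P).Nodup := hnd
        have e : (rest ++ [p]) ++ P = rest ++ (p :: P) := by simp
        rw [e] at h1
        exact (List.nodup_append.mp h1).2.1
      have hlenP : (p :: P).length ≤ (cellPts rows).length := by
        refine length_le_cells rows (p :: P) hndP ?_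
        intro x hx
        apply hInb
        rcases List.mem_cons.mp hx with rfl | hx
        · exact hpS
        · exact List.mem_append_right _ hx
      have hf' : (cellPts rows).length - (p :: P).length < fuel := by
        simp only [List.length_cons] at hlenP ⊢
        omega
      have hn' : n + 1 = (((p :: P).length : Nat) : Int) := by
        rw [hn]
        simp only [List.length_cons]
        push_cast
        ring
      simp only [bLabelGo, hpop]
      by_cases h9 : bHeight rows p.1 p.2 < 9
      · rw [if_pos h9]
        obtain ⟨new, label', e, c1, c2, c3, c4, c5⟩ := blabel_push rows s label₀
          [(p.1 + 1, p.2), (p.1 - 1, p.2), (p.1, p.2 + 1), (p.1, p.2 - 1)]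
          rest ((rest ++ [p]) ++ P) label
          (fun q hq => hsome q hq) (fun q hq => hother q hq) hnd
        rw [e]
        have hsetS' : ∀ z, z ∈ (rest ++ new) ++ (p :: P) ↔ z ∈ ((rest ++ [p]) ++ P) ++ new := by
          intro z
          simp only [List.mem_append, List.mem_cons]
          tauto
        have hnd'' : ((rest ++ new) ++ (p :: P)).Nodup := by
          have e2 : ((rest ++ [p]) ++ P) ++ new = rest ++ (([p] ++ P) ++ new) := by
            simp [List.append_assoc]
          have e3 : (rest ++ new) ++ (p :: P) = rest ++ (new ++ ([p] ++ P)) := by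
            simp [List.append_assoc]
          rw [e3]
          rw [e2] at c3
          exact ((List.perm_append_comm (l₁ := [p] ++ P) (l₂ := new)).append_left rest).nodup_iff.mp c3
        obtain ⟨F, labelF, g0, g1, g2, g3, g4, g5, g6⟩ := ih (rest ++ new) (p :: P) label' (n + 1)
          (by intro x hx
              rcases List.mem_append.mp ((hsetS' x).mp hx) with hx | hx
              · exact hfresh x hx
              · exact (c4 x hx).2.2.2)
          hnd''
          (by intro x hx
              rcases List.mem_append.mp ((hsetS' x).mp hx) with hx | hx
              · exact hRe x hx
              · obtain ⟨ha, hb, _, _⟩ := c4 x hx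
                exact Relation.ReflTransGen.tail (hRe p hpS) ⟨ha, h9, hb⟩)
          (by intro x hx
              rcases List.mem_append.mp ((hsetS' x).mp hx) with hx | hx
              · exact hInb x hx
              · exact inb_of_lt9 rows x (c4 x hx).2.1)
          (fun q hq => c1 q ((hsetS' q).mp hq))
          (fun q hq => c2 q (fun hmem => hq ((hsetS' q).mpr hmem)))
          (by intro x hx q hq
              rcases List.mem_cons.mp hx with rfl | hx
              · rcases c5 q hq.1 hq.2.2 with hin | hin
                · exact Or.inl ((hsetS' q).mpr hin)
                · exact Or.inr hin
              · rcases hclosed x hx q hq with hin | hin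
                · exact Or.inl ((hsetS' q).mpr (List.mem_append_left _ hin))
                · exact Or.inr hin)
          hn' hf'
        refine ⟨F, labelF, g0, g1, g2, g3, ?_, g5, g6⟩
        intro x hx
        exact g4 x ((hsetS' x).mpr (List.mem_append_left _ hx))
      · rw [if_neg h9]
        have hset : ∀ z, z ∈ rest ++ (p :: P) ↔ z ∈ (rest ++ [p]) ++ P := by
          intro z
          simp only [List.mem_append, List.mem_cons]
          tauto
        have hnd' : (rest ++ (p :: P)).Nodup := by
          have e : (rest ++ [p]) ++ P = rest ++ (p :: P) := by simp
          rw [e] at hnd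
          exact hnd
        obtain ⟨F, labelF, g0, g1, g2, g3, g4, g5, g6⟩ := ih rest (p :: P) label (n + 1)
          (fun x hx => hfresh x ((hset x).mp hx))
          hnd'
          (fun x hx => hRe x ((hset x).mp hx))
          (fun x hx => hInb x ((hset x).mp hx))
          (fun q hq => hsome q ((hset q).mp hq))
          (fun q hq => hother q (fun hmem => hq ((hset q).mpr hmem)))
          (by intro x hx q hq
              rcases List.mem_cons.mp hx with rfl | hx
              · exact absurd hq.2.1 h9
              · rcases hclosed x hx q hq with hin | hin
                · exact Or.inl ((hset q).mpr hin)
                · exact Or.inr hin)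
          hn' hf'
        refine ⟨F, labelF, g0, g1, g2, g3, ?_, g5, g6⟩
        intro x hx
        exact g4 x ((hset x).mpr hx)

lemma bbody_step (rows : List (List Int))
    (ls : PySem.Dict (Int × Int) (Int × Int) × PySem.Dict (Int × Int) Int) (p : Int × Int)
    (hinb : Inb rows p) (hinv : BInv rows ls) :
    BInv rows (bBody rows ((rows.map List.length).sum + 1) ls p) ∧
    (bBody rows ((rows.map List.length).sum + 1) ls p).1.contains p = true ∧
    (∀ q, ls.1.contains q = true →
      (bBody rows ((rows.map List.length).sum + 1) ls p).1.contains q = true) := by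
  unfold bBody
  by_cases hc : ls.1.contains p = true
  · rw [if_pos hc]
    exact ⟨hinv, hc, fun q h => h⟩
  · rw [if_neg hc]
    have hfresh : ls.1.contains p = false := by simpa using hc
    obtain ⟨F, labelF, g0, g1, g2, g3, g4, g5, g6⟩ := blabel_go_char rows p ls.1
      ((rows.map List.length).sum + 1) [p] [] (ls.1.insert p p) 0
      (by intro x hx; simp only [List.append_nil, List.mem_singleton] at hx; subst hx; exact hfresh)
      (by simp)
      (by intro x hx; simp only [List.append_nil, List.mem_singleton] at hx; subst hx
          exact Relation.ReflTransGen.refl)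
      (by intro x hx; simp only [List.append_nil, List.mem_singleton] at hx; subst hx; exact hinb)
      (by intro q hq; simp only [List.append_nil, List.mem_singleton] at hq; subst hq
          exact PySem.Dict.get?_insert_self _ _ _)
      (by intro q hq; simp only [List.append_nil, List.mem_singleton] at hq
          exact PySem.Dict.get?_insert_of_ne _ _ hq)
      (by simp)
      (by simp)
      (by rw [← length_cellPts]; omega)
    simp only [g0]
    have hpF : p ∈ F := g4 p (by simp)
    have hcontF : ∀ q, labelF.contains q = true ↔ q ∈ F ∨ ls.1.contains q = true := by
      intro q
      by_cases hqf : q ∈ F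
      · rw [PySem.Dict.contains_eq_isSome_get?, g1 q hqf]
        simp [hqf]
      · rw [PySem.Dict.contains_eq_isSome_get?, g2 q hqf, ← PySem.Dict.contains_eq_isSome_get?]
        simp [hqf]
    have hmemF : ∀ z, z ∈ F ↔ Reach rows p z := by
      intro z
      refine ⟨fun h => (g5 z h).1, fun hr => ?_⟩
      induction hr with
      | refl => exact hpF
      | @tail b c hab hstep ihz =>
        rcases g6 b ihz c hstep with h | h
        · exact h
        · exfalso
          have hrc : Reach rows p c := Relation.ReflTransGen.tail hab hstep
          have := reach_closed ls.1 hinv.1 h (reach_symm hrc)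
          rw [this] at hfresh
          exact absurd hfresh (by simp)
    refine ⟨⟨?_, ?_⟩, (hcontF p).mpr (Or.inl hpF), fun q hq => (hcontF q).mpr (Or.inr hq)⟩
    · intro x q hx hq
      rcases (hcontF x).mp hx with hxF | hxO
      · rcases g6 x hxF q hq with h | h
        · exact (hcontF q).mpr (Or.inl h)
        · exact (hcontF q).mpr (Or.inr h)
      · exact (hcontF q).mpr (Or.inr (hinv.1 x q hxO hq))
    · intro x hx
      rcases (hcontF x).mp hx with hxF | hxO
      · refine ⟨p, F, g1 x hxF, (hcontF p).mpr (Or.inl hpF), (g5 x hxF).1, ?_, g3, hmemF⟩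
        exact PySem.Dict.get?_insert_self _ _ _
      · obtain ⟨s, P, o1, o2, o3, o4, o5, o6⟩ := hinv.2 x hxO
        have hsp : s ≠ p := by
          rintro rfl
          rw [o2] at hfresh
          exact absurd hfresh (by simp)
        have hxF : x ∉ F := fun h => by
          rw [(g5 x h).2.1] at hxO
          exact absurd hxO (by simp)
        refine ⟨s, P, by rw [g2 x hxF]; exact o1, (hcontF s).mpr (Or.inr o2), o3, ?_, o5, o6⟩
        rw [PySem.Dict.get?_insert_of_ne _ _ hsp]
        exact o4

lemma bpass_inv (rows : List (List Int)) :
    ∀ (l : List (Int × Int)) (ls : PySem.Dict (Int × Int) (Int × Int) × PySem.Dict (Int × Int) Int),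
      (∀ p ∈ l, Inb rows p) → BInv rows ls →
      BInv rows (l.foldl (bBody rows ((rows.map List.length).sum + 1)) ls) ∧
      (∀ q, ls.1.contains q = true →
        (l.foldl (bBody rows ((rows.map List.length).sum + 1)) ls).1.contains q = true) ∧
      (∀ p ∈ l, (l.foldl (bBody rows ((rows.map List.length).sum + 1)) ls).1.contains p = true) := by
  intro l
  induction l with
  | nil => intro ls _ hinv; exact ⟨hinv, fun q h => h, by simp⟩
  | cons p t ih =>
    intro ls hl hinv
    obtain ⟨h1, h2, h3⟩ := bbody_step rows ls p (hl p (by simp)) hinv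
    obtain ⟨g1, g2, g3⟩ := ih (bBody rows ((rows.map List.length).sum + 1) ls p)
      (fun q hq => hl q (by simp [hq])) h1
    refine ⟨g1, fun q hq => g2 q (h3 q hq), ?_⟩
    intro q hq
    rcases List.mem_cons.mp hq with rfl | hq
    · exact g2 q h2
    · exact g3 q hq

lemma bLabelPass_eq_foldl (rows : List (List Int)) (fuel : Nat) :
    bLabelPass rows fuel = (cellPts rows).foldl (bBody rows fuel)
      (PySem.Dict.empty, PySem.Dict.empty) := by
  unfold bLabelPass cellPts bBody
  rw [foldl_flatMap]
  simp [List.foldl_map]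

lemma lookup_eq_fill (content : String) (hpre : Pre_solve content) (p0 : Int × Int)
    (hinb : Inb (bRows content) p0)
    (hlow : bIsLow (bRows content) p0.1 p0.2 (Cellv (bRows content) p0) = true) :
    aFillGo (aGrid content) ((aGrid content).size + 1) [p0]
      (PySem.Set.empty : PySem.Set (Int × Int))
    = (bLabelPass (bRows content) (((bRows content).map List.length).sum + 1)).2.getD
        ((bLabelPass (bRows content) (((bRows content).map List.length).sum + 1)).1.getD p0 (0, 0)) 0 := by
  obtain ⟨hinv, hmono, hall⟩ := bpass_inv (bRows content) (cellPts (bRows content))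
    (PySem.Dict.empty, PySem.Dict.empty)
    (fun p hp => (mem_cellPts _ p).mp hp)
    ⟨fun x q hx _ => by rw [PySem.Dict.contains_empty] at hx; exact absurd hx (by simp),
     fun x hx => by rw [PySem.Dict.contains_empty] at hx; exact absurd hx (by simp)⟩
  rw [bLabelPass_eq_foldl]
  have hc : ((cellPts (bRows content)).foldl
      (bBody (bRows content) (((bRows content).map List.length).sum + 1))
      (PySem.Dict.empty, PySem.Dict.empty)).1.contains p0 = true :=
    hall p0 ((mem_cellPts _ p0).mpr hinb)
  obtain ⟨s, P, o1, o2, o3, o4, o5, o6⟩ := hinv.2 p0 hc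
  have hgl : ((cellPts (bRows content)).foldl
      (bBody (bRows content) (((bRows content).map List.length).sum + 1))
      (PySem.Dict.empty, PySem.Dict.empty)).1.getD p0 (0, 0) = s :=
    PySem.Dict.getD_of_get?_eq_some _ _ o1
  have hgs : ((cellPts (bRows content)).foldl
      (bBody (bRows content) (((bRows content).map List.length).sum + 1))
      (PySem.Dict.empty, PySem.Dict.empty)).2.getD s 0 = ((P.length : Nat) : Int) :=
    PySem.Dict.getD_of_get?_eq_some _ _ o4
  rw [hgl, hgs]
  by_cases h9 : bHeight (bRows content) p0.1 p0.2 < 9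
  · obtain ⟨V, a1, a2, a3⟩ := afill_main content hpre p0 h9
    rw [a1]
    have hiff : ∀ z, z ∈ V ↔ z ∈ P := by
      intro z
      rw [a3 z, o6 z]
      exact ⟨fun h => Relation.ReflTransGen.trans o3 h,
        fun h => Relation.ReflTransGen.trans (reach_symm o3) h⟩
    rw [List.Perm.length_eq ((List.perm_ext_iff_of_nodup a2 o5).mpr hiff)]
  · rw [afill_nine content hpre p0 hinb hlow h9]
    have hs : s = p0 := by
      rcases Relation.ReflTransGen.cases_tail o3 with h | ⟨c, _, hstep⟩
      · exact h.symm
      · exact absurd hstep.2.2 h9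
    subst hs
    have hP : ∀ z, z ∈ P ↔ z = s := by
      intro z
      rw [o6 z]
      constructor
      · intro h
        rcases Relation.ReflTransGen.cases_head h with h | ⟨c, hstep, _⟩
        · exact h.symm
        · exact absurd hstep.2.1 h9
      · rintro rfl
        exact Relation.ReflTransGen.refl
    have hlen : P.length = 1 := by
      have hperm : P.Perm [s] := (List.perm_ext_iff_of_nodup o5 (List.nodup_singleton _)).mpr
        (by intro a; simp [hP a])
      simpa using hperm.length_eq
    rw [hlen]
    rfl

lemma isLow_eq (content : String) (x y h : Int) :
    ([((1 : Int), (0 : Int)), (-1, 0), (0, 1), (0, -1)].all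
      (fun dd => decide (h < (aGrid content).getD (x + dd.1, y + dd.2) 10)))
    = bIsLow (bRows content) x y h := by
  simp only [List.all_cons, List.all_nil, Bool.and_true, bIsLow, hg10_lemma, add_zero]
  rw [Bool.and_assoc, Bool.and_assoc]
  have e1 : x + -1 = x - 1 := by ring
  have e2 : y + -1 = y - 1 := by ring
  rw [e1, e2]

lemma pb_eq (content : String) (hpre : Pre_solve content) :
    ((aGrid content).items.filter (fun ph =>
        [((1 : Int), (0 : Int)), (-1, 0), (0, 1), (0, -1)].all
          (fun dd => decide (ph.2 < (aGrid content).getD (ph.1.1 + dd.1, ph.1.2 + dd.2) 10)))).foldl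
      (fun (acc : Int × List Int) ph =>
        (acc.1 + ph.2 + 1,
         acc.2 ++ [aFillGo (aGrid content) ((aGrid content).size + 1) [ph.1]
           (PySem.Set.empty : PySem.Set (Int × Int))]))
      ((0 : Int), ([] : List Int))
    = (PySem.List.enumerate (bRows content)).foldl
      (fun (acc : Int × List Int) yr =>
        (PySem.List.enumerate yr.2).foldl
          (fun (acc : Int × List Int) xh =>
            if bIsLow (bRows content) xh.1 yr.1 xh.2 then
              (acc.1 + xh.2 + 1,
               acc.2 ++ [(bLabelPass (bRows content) (((bRows content).map List.length).sum + 1)).2.getD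
                 ((bLabelPass (bRows content) (((bRows content).map List.length).sum + 1)).1.getD
                   (xh.1, yr.1) (0, 0)) 0])
            else acc) acc)
      ((0 : Int), ([] : List Int)) := by
  rw [items_aGrid, ← PySem.List.foldl_if_eq_foldl_filter]
  rw [show cellList (PySem.Str.splitlines (PySem.Str.strip content))
      = (PySem.List.enumerate (PySem.Str.splitlines (PySem.Str.strip content))).flatMap
          (fun yl => (PySem.List.enumerate yl.2.toList).map
            (fun xc => ((xc.1, yl.1), pyIntChar xc.2))) from rfl]
  rw [foldl_flatMap]
  rw [show PySem.List.enumerate (bRows content)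
      = (PySem.List.enumerate (PySem.Str.splitlines (PySem.Str.strip content))).map
          (fun p => (p.1, p.2.toList.map pyIntChar)) from by rw [bRows, enumerate_map]]
  rw [List.foldl_map]
  apply PySem.List.foldl_congr_mem
  intro acc yl hyl
  simp only [List.foldl_map, enumerate_map]
  apply PySem.List.foldl_congr_mem
  intro acc2 xc hxc
  show _ = _
  rw [isLow_eq content xc.1 yl.1 (pyIntChar xc.2)]
  by_cases hlow : bIsLow (bRows content) xc.1 yl.1 (pyIntChar xc.2)
  · rw [if_pos hlow, if_pos hlow]
    rw [PySem.List.mem_enumerate_iff] at hyl hxc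
    obtain ⟨yk, hyk, rfl⟩ := hyl
    obtain ⟨xk, hxk, rfl⟩ := hxc
    simp only [zero_add] at hlow ⊢
    have hinb : Inb (bRows content) ((xk : Int), (yk : Int)) := by
      refine ⟨by simp, ?_, by simp, ?_⟩
      · have hl := length_bRows content
        have : (yk : Int) < ((PySem.Str.splitlines (PySem.Str.strip content)).length : Int) := by
          exact_mod_cast hyk
        omega
      · simp only [Int.toNat_natCast]
        rw [len_rows_getD content yk hyk]
        exact_mod_cast hxk
    have hcv : Cellv (bRows content) ((xk : Int), (yk : Int))
        = pyIntChar (PySem.Str.splitlines (PySem.Str.strip content))[yk].toList[xk] := by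
      unfold Cellv
      simp only [Int.toNat_natCast]
      have hrow : (bRows content).getD yk []
          = (PySem.Str.splitlines (PySem.Str.strip content))[yk].toList.map pyIntChar := by
        simp [bRows, List.getD, hyk]
      rw [hrow]
      simp only [List.getD, List.getElem?_map, List.getElem?_eq_getElem hxk, Option.map_some,
        Option.getD_some]
    rw [lookup_eq_fill content hpre ((xk : Int), (yk : Int)) hinb (by rw [hcv]; exact hlow)]
  · rw [if_neg hlow, if_neg hlow]

theorem solve_eq (content : String) (hpre : Pre_solve content) :
    solve content = solve_alt content := by
  simp only [solve, solve_alt]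
  rw [pb_eq content hpre]

-- ===== VERDICT (by name: the statement is the Claim_ definition above) =====
theorem solve_spec : Claim_equal_solve := by
  intro content _ hpre
  unfold Spec_solve
  exact solve_eq content hpre
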